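-- pv_equiv track=rewrite | github.com/Connor205/Cellular-Automata | python-visualization/graphics_implementation.py | automota_pass
-- ===== SOURCE A (Python) =====
-- def coord_in_range(row: int, col: int, grid: list):
--     return row >= 0 and col >= 0 and row < len(grid) and col < len(grid[0])
--
-- def automota_pass(grid):
--     height = len(grid)
--     width = len(grid[0])
--     new_grid = [[None for x in range(width)] for y in range(height)]
--     for row in range(height):
--         for col in range(width):
--             trues = 0
--             if coord_in_range(row, col, grid) and grid[row][col]:
--                 trues += 1
--             row -= 1
--             col -= 1
--             # Upper left
--             if coord_in_range(row, col, grid) and grid[row][col]: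
--                 trues += 1
--             col += 1
--             if coord_in_range(row, col, grid) and grid[row][col]:
--                 trues += 1
--             col += 1
--             if coord_in_range(row, col, grid) and grid[row][col]:
--                 trues += 1
--             row += 1
--             if coord_in_range(row, col, grid) and grid[row][col]:
--                 trues += 1
--             row += 1
--             if coord_in_range(row, col, grid) and grid[row][col]:
--                 trues += 1
--             col -= 1
--             if coord_in_range(row, col, grid) and grid[row][col]:
--                 trues += 1
--             col -= 1
--             if coord_in_range(row, col, grid) and grid[row][col]:
--                 trues += 1
--             row -= 1
--             if coord_in_range(row, col, grid) and grid[row][col]: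
--                 trues += 1
--             col += 1
--             new_grid[row][col] = trues > 4
--     return new_grid
-- ===== SOURCE B (Python) =====
-- def automota_pass(grid):
--     # Separable 3x3 box count: horizontal counts per row, then vertical sums of those.
--     height = len(grid)
--     width = len(grid[0])
--     hcounts = [[sum(1 for cc in (c - 1, c, c + 1)
--                     if 0 <= cc < width and row[cc])
--                 for c in range(width)]
--                for row in grid]
--     return [[sum(hcounts[rr][c] for rr in (r - 1, r, r + 1)
--                  if 0 <= rr < height) > 4
--              for c in range(width)]
--             for r in range(height)]
-- ===== Notes on version B (the rewrite author's own statement) =====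
-- stated objective: alternative
-- what changed: Replaces A's nine guarded neighbor probes per cell with a separable 3x3 box convolution: one pass builds per-row horizontal counts, a second pass sums three of those vertically per cell.
import Mathlib
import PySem

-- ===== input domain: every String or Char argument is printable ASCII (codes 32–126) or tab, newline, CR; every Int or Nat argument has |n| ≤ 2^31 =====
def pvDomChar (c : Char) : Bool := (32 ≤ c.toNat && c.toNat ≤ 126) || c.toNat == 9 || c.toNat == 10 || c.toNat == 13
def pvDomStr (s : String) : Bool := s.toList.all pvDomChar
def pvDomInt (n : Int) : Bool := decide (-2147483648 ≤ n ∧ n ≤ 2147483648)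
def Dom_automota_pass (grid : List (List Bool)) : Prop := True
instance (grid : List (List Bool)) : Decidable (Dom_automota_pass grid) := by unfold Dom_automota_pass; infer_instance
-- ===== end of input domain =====

-- B computes the 3x3 box count as a separable convolution (row counts, then column sums) instead of nine guarded probes per cell; objective: alternative/simpler.

-- ===== PORT A =====
-- len(grid[0]) is exact as (grid.headD []).length under Pre_ (grid nonempty)
def coord_in_range (row col : Int) (grid : List (List Bool)) : Bool :=
  decide (0 ≤ row) && decide (0 ≤ col) && decide (row < (grid.length : Int)) && decide (col < ((grid.headD []).length : Int))

-- grid[row][col]; exact under the coord_in_range guard and Pre_ (every row at least width long)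
def pvCellA (grid : List (List Bool)) (row col : Int) : Bool :=
  (PySem.List.pyGet? ((PySem.List.pyGet? grid row).getD []) col).getD false

-- the nine guarded probes of A, in A's pointer-shuffling order
def pvTruesA (grid : List (List Bool)) (row col : Int) : Int :=
  let t : Int := if coord_in_range row col grid && pvCellA grid row col then 1 else 0
  let row := row - 1
  let col := col - 1
  let t := if coord_in_range row col grid && pvCellA grid row col then t + 1 else t
  let col := col + 1
  let t := if coord_in_range row col grid && pvCellA grid row col then t + 1 else t
  let col := col + 1
  let t := if coord_in_range row col grid && pvCellA grid row col then t + 1 else t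
  let row := row + 1
  let t := if coord_in_range row col grid && pvCellA grid row col then t + 1 else t
  let row := row + 1
  let t := if coord_in_range row col grid && pvCellA grid row col then t + 1 else t
  let col := col - 1
  let t := if coord_in_range row col grid && pvCellA grid row col then t + 1 else t
  let col := col - 1
  let t := if coord_in_range row col grid && pvCellA grid row col then t + 1 else t
  let row := row - 1
  let t := if coord_in_range row col grid && pvCellA grid row col then t + 1 else t
  t

def automota_pass (grid : List (List Bool)) : List (List Bool) :=
  let height := grid.length
  let width := (grid.headD []).length
  (List.range height).map (fun (r : Nat) =>
    (List.range width).map (fun (c : Nat) => decide (pvTruesA grid (r : Int) (c : Int) > 4)))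

-- ===== PORT B =====
-- sum(1 for cc in (c-1,c,c+1) if 0 <= cc < width and row[cc])
def pvHCount (row : List Bool) (width c : Int) : Int :=
  ([c - 1, c, c + 1].map (fun cc =>
    if (decide (0 ≤ cc) && decide (cc < width)) && (PySem.List.pyGet? row cc).getD false then (1 : Int) else 0)).sum

-- sum(hcounts[rr][c] for rr in (r-1,r,r+1) if 0 <= rr < height)
def pvVSum (hcounts : List (List Int)) (height r c : Int) : Int :=
  ([r - 1, r, r + 1].map (fun rr =>
    if decide (0 ≤ rr) && decide (rr < height) then
      (PySem.List.pyGet? ((PySem.List.pyGet? hcounts rr).getD []) c).getD 0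
    else 0)).sum

def automota_pass_alt (grid : List (List Bool)) : List (List Bool) :=
  let height := grid.length
  let width := (grid.headD []).length
  let hcounts := grid.map (fun row => (List.range width).map (fun (c : Nat) => pvHCount row (width : Int) (c : Int)))
  (List.range height).map (fun (r : Nat) =>
    (List.range width).map (fun (c : Nat) => decide (pvVSum hcounts (height : Int) (r : Int) (c : Int) > 4)))

-- ===== PRECONDITION & SPEC =====
-- Pre_ excludes exactly the inputs where A raises IndexError: the empty grid (len(grid[0]))
-- and ragged grids with a row shorter than the first row (grid[row][col] for col < width).
def Pre_automota_pass (grid : List (List Bool)) : Prop :=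
  grid ≠ [] ∧ ∀ row ∈ grid, (grid.headD []).length ≤ row.length
instance (grid : List (List Bool)) : Decidable (Pre_automota_pass grid) := by unfold Pre_automota_pass; infer_instance

def pvWitness_automota_pass : List (List Bool) := [[true, false, true], [true, true, false]]

def Spec_automota_pass (grid : List (List Bool)) (out : List (List Bool)) : Prop := out = automota_pass_alt grid
instance (grid : List (List Bool)) (out : List (List Bool)) : Decidable (Spec_automota_pass grid out) := by unfold Spec_automota_pass; infer_instance

-- ===== CLAIM (what is proved, stated in full; the proofs are below) =====
def Claim_equal_automota_pass : Prop := ∀ (grid : List (List Bool)), Dom_automota_pass grid → Pre_automota_pass grid → Spec_automota_pass grid (automota_pass grid)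

-- ===== LEMMAS AND PROOFS =====

-- one guarded probe of A as a 0/1 indicator
def pvInd (grid : List (List Bool)) (rr cc : Int) : Int :=
  if coord_in_range rr cc grid && pvCellA grid rr cc then 1 else 0

lemma ite_step (P : Prop) [Decidable P] (t : Int) : (if P then t + 1 else t) = t + (if P then 1 else 0) := by
  split <;> simp

lemma truesA_as_sum (grid : List (List Bool)) (r c : Int) :
    pvTruesA grid r c =
      (pvInd grid (r-1) (c-1) + pvInd grid (r-1) c + pvInd grid (r-1) (c+1)) +
      (pvInd grid r (c-1) + pvInd grid r c + pvInd grid r (c+1)) +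
      (pvInd grid (r+1) (c-1) + pvInd grid (r+1) c + pvInd grid (r+1) (c+1)) := by
  simp only [pvTruesA, pvInd, ite_step]
  ring_nf

-- the three column indicators of one row equal A's indicators, rowwise
lemma ind_eq_gate (grid : List (List Bool)) (rr cc : Int) :
    pvInd grid rr cc =
      if decide (0 ≤ rr) && decide (rr < (grid.length : Int)) then
        (if (decide (0 ≤ cc) && decide (cc < ((grid.headD []).length : Int)))
            && (PySem.List.pyGet? ((PySem.List.pyGet? grid rr).getD []) cc).getD false then (1:Int) else 0)
      else 0 := by
  simp only [pvInd, coord_in_range, pvCellA]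
  by_cases h1 : 0 ≤ rr <;> by_cases h2 : rr < (grid.length : Int) <;>
    by_cases h3 : 0 ≤ cc <;> by_cases h4 : cc < ((grid.headD []).length : Int) <;>
    simp [h1, h2, h3]

lemma row_term_eq (grid : List (List Bool)) (rr : Int) (c : Nat)
    (hc : c < (grid.headD []).length) :
    (if decide (0 ≤ rr) && decide (rr < (grid.length : Int)) then
       (PySem.List.pyGet? ((PySem.List.pyGet?
          (grid.map (fun row => (List.range (grid.headD []).length).map
            (fun (c : Nat) => pvHCount row (((grid.headD []).length : Nat) : Int) (c : Int)))) rr).getD [])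
          (c : Int)).getD 0
     else 0)
    = pvInd grid rr ((c : Int) - 1) + pvInd grid rr (c : Int) + pvInd grid rr ((c : Int) + 1) := by
  by_cases hg : 0 ≤ rr ∧ rr < (grid.length : Int)
  · obtain ⟨h1, h2⟩ := hg
    obtain ⟨n, rfl⟩ : ∃ n : Nat, rr = (n : Int) := ⟨rr.toNat, (Int.toNat_of_nonneg h1).symm⟩
    have hn : n < grid.length := by exact_mod_cast h2
    have hgate : (decide (0 ≤ (n : Int)) && decide ((n : Int) < (grid.length : Int))) = true := by
      simp [h2]
    have hrowmap : (PySem.List.pyGet?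
        (grid.map (fun row => (List.range (grid.headD []).length).map
          (fun (c : Nat) => pvHCount row (((grid.headD []).length : Nat) : Int) (c : Int)))) (n : Int)).getD []
        = (List.range (grid.headD []).length).map
            (fun (c : Nat) => pvHCount grid[n] (((grid.headD []).length : Nat) : Int) (c : Int)) := by
      rw [PySem.List.pyGet?_natCast]
      simp only [List.getElem?_map, List.getElem?_eq_getElem hn, Option.map_some, Option.getD_some]
    have hcell : (PySem.List.pyGet? ((List.range (grid.headD []).length).map
          (fun (c : Nat) => pvHCount grid[n] (((grid.headD []).length : Nat) : Int) (c : Int))) (c : Int)).getD 0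
        = pvHCount grid[n] (((grid.headD []).length : Nat) : Int) (c : Int) := by
      rw [PySem.List.pyGet?_natCast]
      rw [List.getElem?_eq_getElem (by simpa using hc)]
      simp only [Option.getD_some, List.getElem_map, List.getElem_range]
    have hgrow : (PySem.List.pyGet? grid (n : Int)).getD [] = grid[n] := by
      rw [PySem.List.pyGet?_natCast]
      simp only [List.getElem?_eq_getElem hn, Option.getD_some]
    rw [hgate, if_pos rfl, hrowmap, hcell]
    simp only [ind_eq_gate, hgate, hgrow, pvHCount, List.map_cons, List.map_nil,
      List.sum_cons, List.sum_nil, add_zero, if_true, Bool.and_assoc]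
    exact (add_assoc _ _ _).symm
  · have hg' : (decide (0 ≤ rr) && decide (rr < (grid.length : Int))) = false := by
      simp only [Bool.and_eq_false_iff, decide_eq_false_iff_not]; tauto
    simp only [ind_eq_gate, hg', Bool.false_eq_true, if_false, add_zero]

theorem automota_pass_spec : Claim_equal_automota_pass := by
  intro grid _ _
  unfold Spec_automota_pass automota_pass automota_pass_alt
  apply List.map_congr_left
  intro r hr
  apply List.map_congr_left
  intro c hc
  simp only [List.mem_range] at hr hc
  congr 1
  rw [truesA_as_sum, pvVSum]
  simp only [List.map_cons, List.map_nil, List.sum_cons, List.sum_nil, add_zero]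
  rw [row_term_eq grid ((r:Int)-1) c hc, row_term_eq grid (r:Int) c hc,
      row_term_eq grid ((r:Int)+1) c hc]
  rw [add_assoc]
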